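-- pv_equiv track=rewrite | github.com/chjung99/codetree-TILs | 250406/메두사와 전사들/medusa-and-warriors.py | update_warrior_count_grid
-- ===== SOURCE A (Python) =====
-- from typing import List, Tuple
--
-- Point = Tuple[int, int]
--
-- def update_warrior_count_grid(N: int, M: int, warrior_positions: List[Point]) -> List[List[int]]:
--     """
--     현재 전사들의 위치를 기반으로 각 셀에 있는 전사의 수를 업데이트하는 함수
--
--     :param N: 그리드의 크기
--     :param M: 전사의 수
--     :param warrior_positions: 전사들의 현재 위치
--     :return: 각 셀에 있는 전사의 수 그리드
--     """
--     # 전사 수 그리드를 초기화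
--     warrior_count_grid = [[0 for _ in range(N)] for _ in range(N)]
--
--     # 각 전사의 위치를 확인하여 전사 수 그리드에 반영
--     for i in range(M):
--         if warrior_positions[i][0] == -1:
--             continue  # 이미 잡힌 전사는 건너뜀
--         x, y = warrior_positions[i]
--         warrior_count_grid[x][y] += 1
--
--     return warrior_count_grid
-- ===== SOURCE B (Python) =====
-- from typing import List, Tuple
--
-- Point = Tuple[int, int]
--
-- def update_warrior_count_grid(N: int, M: int, warrior_positions: List[Point]) -> List[List[int]]:
--     # Gather the active warriors once, then fill each cell by counting its
--     # occurrences in that list (gather/count instead of scatter/increment).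
--     active = []
--     for i in range(M):
--         p = warrior_positions[i]
--         if p[0] != -1:
--             active.append(p)
--     return [[active.count((r, c)) for c in range(N)] for r in range(N)]
-- ===== Notes on version B (the rewrite author's own statement) =====
-- stated objective: alternative
-- what changed: A preallocates an NxN grid and scatters indexed increments into it per warrior; B never mutates a grid: it collects the active warriors into a list and builds the result by counting, for every cell (r,c), how often (r,c) occurs in that list (gather/count vs scatter/increment).
-- outside the precondition, e.g. on update_warrior_count_grid(2, 1, [(0, -1)]): A returns [[0, 1], [0, 0]], B returns [[0, 0], [0, 0]]; on update_warrior_count_grid(2, 1, [(5, 0)]): A raises IndexError, B returns [[0, 0], [0, 0]]; on update_warrior_count_grid(2, 2, [(0, 0)]): A raises IndexError, B raises IndexError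
import Mathlib
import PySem

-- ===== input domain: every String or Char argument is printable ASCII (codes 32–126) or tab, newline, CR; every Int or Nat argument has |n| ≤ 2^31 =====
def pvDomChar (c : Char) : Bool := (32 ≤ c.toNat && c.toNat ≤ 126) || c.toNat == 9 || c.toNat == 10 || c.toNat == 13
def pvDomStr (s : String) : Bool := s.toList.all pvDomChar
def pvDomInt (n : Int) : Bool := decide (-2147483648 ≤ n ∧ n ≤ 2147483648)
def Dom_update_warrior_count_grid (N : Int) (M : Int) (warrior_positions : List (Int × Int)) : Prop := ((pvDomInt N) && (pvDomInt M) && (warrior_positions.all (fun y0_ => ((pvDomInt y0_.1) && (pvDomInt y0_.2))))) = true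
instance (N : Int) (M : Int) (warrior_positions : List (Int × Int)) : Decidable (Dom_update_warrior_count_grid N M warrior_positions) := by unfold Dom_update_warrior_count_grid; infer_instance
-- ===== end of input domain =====

-- B replaces A's scatter of indexed increments into a preallocated grid by a
-- gather/count scheme: collect the active warriors, then fill each cell by
-- counting its occurrences (alternative decomposition, no grid mutation).

-- ===== PORT A =====
-- one step of A's loop body: grid[x][y] += 1 (negative indices wrap, as in Python)
def pvStepA (grid : List (List Int)) (p : Int × Int) : List (List Int) :=
  if p.1 = -1 then grid
  else
    let row := PySem.List.pyGetD grid p.1 []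
    PySem.List.pySetD grid p.1 (PySem.List.pySetD row p.2 (PySem.List.pyGetD row p.2 0 + 1))

def update_warrior_count_grid (N : Int) (M : Int) (warrior_positions : List (Int × Int)) : List (List Int) :=
  let grid0 := (PySem.List.pyRange 0 N 1).map (fun _ => (PySem.List.pyRange 0 N 1).map (fun _ => (0 : Int)))
  (PySem.List.pyRange 0 M 1).foldl (fun grid i =>
    match PySem.List.pyGet? warrior_positions i with
    | none => grid          -- IndexError in Python: excluded by Pre_
    | some p => pvStepA grid p) grid0

-- ===== PORT B =====
def update_warrior_count_grid_alt (N : Int) (M : Int) (warrior_positions : List (Int × Int)) : List (List Int) :=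
  let active := (PySem.List.pyRange 0 M 1).foldl (fun acc i =>
    match PySem.List.pyGet? warrior_positions i with
    | none => acc           -- IndexError in Python: excluded by Pre_
    | some p => if p.1 ≠ -1 then acc ++ [p] else acc) []
  (PySem.List.pyRange 0 N 1).map (fun r => (PySem.List.pyRange 0 N 1).map (fun c =>
    (PySem.List.count active (r, c) : Int)))

-- ===== PRECONDITION & SPEC =====
-- Pre_ excludes inputs where some of the first M non-captured warriors has a coordinate
-- outside [0, N): a non-negative out-of-range coordinate makes A raise IndexError, and a
-- negative one (other than the captured sentinel x = -1) is counted by A at a wrapped cell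
-- through Python's negative-index wraparound — an accidental corner artefact of A's list
-- indexing on which B (which only tallies cells of the grid) counts that warrior nowhere.
-- Pre_ also requires M ≤ len(warrior_positions) (A raises IndexError otherwise).
def Pre_update_warrior_count_grid (N : Int) (M : Int) (warrior_positions : List (Int × Int)) : Prop :=
  M ≤ (warrior_positions.length : Int) ∧
  ∀ p ∈ warrior_positions.take M.toNat, p.1 = -1 ∨ (0 ≤ p.1 ∧ p.1 < N ∧ 0 ≤ p.2 ∧ p.2 < N)
instance (N : Int) (M : Int) (warrior_positions : List (Int × Int)) : Decidable (Pre_update_warrior_count_grid N M warrior_positions) := by unfold Pre_update_warrior_count_grid; infer_instance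

def pvWitness_update_warrior_count_grid : Int × Int × (List (Int × Int)) := (2, 2, [(0, 1), (-1, -1)])

def Spec_update_warrior_count_grid (N : Int) (M : Int) (warrior_positions : List (Int × Int)) (out : List (List Int)) : Prop := out = update_warrior_count_grid_alt N M warrior_positions
instance (N : Int) (M : Int) (warrior_positions : List (Int × Int)) (out : List (List Int)) : Decidable (Spec_update_warrior_count_grid N M warrior_positions out) := by unfold Spec_update_warrior_count_grid; infer_instance

-- ===== CLAIM (what is proved, stated in full; the proofs are below) =====
def Claim_equal_update_warrior_count_grid : Prop := ∀ (N : Int) (M : Int) (warrior_positions : List (Int × Int)), Dom_update_warrior_count_grid N M warrior_positions → Pre_update_warrior_count_grid N M warrior_positions → Spec_update_warrior_count_grid N M warrior_positions (update_warrior_count_grid N M warrior_positions)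

-- ===== LEMMAS AND PROOFS =====

-- normalized (Python-wrapped) index for -n ≤ i < n
def pvNIdx (n : Nat) (i : Int) : Nat := if 0 ≤ i then i.toNat else n - (-i).toNat

-- the cell grid[r][c], read totally
def pvCell (G : List (List Int)) (r c : Nat) : Int := (G.getD r []).getD c 0

-- the wrapped cell a warrior lands on (as an Int pair)
def pvWrap (n : Nat) (p : Int × Int) : Int × Int :=
  ((if p.1 < 0 then p.1 + n else p.1), (if p.2 < 0 then p.2 + n else p.2))

theorem pvIdx_some (n : Nat) (i : Int) (h1 : -(n:Int) ≤ i) (h2 : i < n) :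
    PySem.List.pyIdx? n i = some (pvNIdx n i) := by
  simp only [PySem.List.pyIdx?, pvNIdx]
  split_ifs <;> first | rfl | omega

theorem pvNIdx_lt (n : Nat) (i : Int) (h1 : -(n:Int) ≤ i) (h2 : i < n) (hn : 0 < n) :
    pvNIdx n i < n := by
  simp only [pvNIdx]; split_ifs <;> omega

theorem pvNIdx_cast (n : Nat) (i : Int) (h1 : -(n:Int) ≤ i) (h2 : i < n) :
    ((pvNIdx n i : Nat) : Int) = if i < 0 then i + n else i := by
  simp only [pvNIdx]; split_ifs <;> omega

theorem pyGetD_in {α : Type} (xs : List α) (n : Nat) (hn : xs.length = n) (i : Int) (d : α)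
    (h1 : -(n:Int) ≤ i) (h2 : i < n) :
    PySem.List.pyGetD xs i d = xs.getD (pvNIdx n i) d := by
  subst hn
  simp [PySem.List.pyGetD, PySem.List.pyGet?, pvIdx_some _ _ h1 h2, List.getD_eq_getElem?_getD]

theorem pySetD_in {α : Type} (xs : List α) (n : Nat) (hn : xs.length = n) (i : Int) (v : α)
    (h1 : -(n:Int) ≤ i) (h2 : i < n) :
    PySem.List.pySetD xs i v = xs.set (pvNIdx n i) v := by
  subst hn
  simp [PySem.List.pySetD, PySem.List.pySet?, pvIdx_some _ _ h1 h2]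

-- side condition bundle for one warrior
def pvOK (n : Nat) (p : Int × Int) : Prop :=
  p.1 = -1 ∨ (-(n:Int) ≤ p.1 ∧ p.1 < n ∧ -(n:Int) ≤ p.2 ∧ p.2 < n)

theorem shape_stepA (n : Nat) (grid : List (List Int)) (hlen : grid.length = n)
    (hrows : ∀ row ∈ grid, row.length = n) (p : Int × Int) (hp : pvOK n p) :
    (pvStepA grid p).length = n ∧ ∀ row ∈ pvStepA grid p, row.length = n := by
  by_cases h1 : p.1 = -1
  · simp only [pvStepA, if_pos h1]; exact ⟨hlen, hrows⟩
  · obtain ⟨ha, hb, hc, hd⟩ := hp.resolve_left h1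
    have hn : 0 < n := by omega
    have hx := pvNIdx_lt n p.1 ha hb hn
    have hrow : PySem.List.pyGetD grid p.1 ([] : List Int) = grid[pvNIdx n p.1]'(by omega) := by
      rw [pyGetD_in grid n hlen p.1 [] ha hb]
      exact List.getD_eq_getElem _ _ (by omega)
    have hrl : (grid[pvNIdx n p.1]'(by omega)).length = n := hrows _ (List.getElem_mem _)
    constructor
    · simp only [pvStepA, if_neg h1, PySem.List.length_pySetD, hlen]
    · intro row hmem
      simp only [pvStepA, if_neg h1] at hmem
      rw [pySetD_in grid n hlen p.1 _ ha hb] at hmem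
      rcases List.mem_or_eq_of_mem_set hmem with h | h
      · exact hrows _ h
      · subst h; rw [PySem.List.length_pySetD, hrow]; exact hrl

theorem cell_stepA (n : Nat) (grid : List (List Int)) (hlen : grid.length = n)
    (hrows : ∀ row ∈ grid, row.length = n) (p : Int × Int) (hp : pvOK n p)
    (r c : Nat) (hr : r < n) (hc : c < n) :
    pvCell (pvStepA grid p) r c =
      pvCell grid r c + (if p.1 ≠ -1 ∧ pvWrap n p = ((r:Int), (c:Int)) then 1 else 0) := by
  by_cases h1 : p.1 = -1
  · simp [pvStepA, h1]
  · obtain ⟨ha, hb, hc2, hd⟩ := hp.resolve_left h1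
    have hn : 0 < n := by omega
    have hx := pvNIdx_lt n p.1 ha hb hn
    have hy := pvNIdx_lt n p.2 hc2 hd hn
    have hrow : PySem.List.pyGetD grid p.1 ([] : List Int) = grid[pvNIdx n p.1]'(by omega) := by
      rw [pyGetD_in grid n hlen p.1 [] ha hb]
      exact List.getD_eq_getElem _ _ (by omega)
    have hrl : (grid[pvNIdx n p.1]'(by omega)).length = n := hrows _ (List.getElem_mem _)
    have hwrap : (pvWrap n p = ((r:Int), (c:Int))) ↔ (pvNIdx n p.1 = r ∧ pvNIdx n p.2 = c) := by
      rw [pvWrap, Prod.mk.injEq, ← pvNIdx_cast n p.1 ha hb, ← pvNIdx_cast n p.2 hc2 hd]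
      constructor
      · rintro ⟨e1, e2⟩; exact ⟨by exact_mod_cast e1, by exact_mod_cast e2⟩
      · rintro ⟨e1, e2⟩; exact ⟨by exact_mod_cast e1, by exact_mod_cast e2⟩
    have houter : ∀ v : List Int,
        (grid.set (pvNIdx n p.1) v).getD r [] = if pvNIdx n p.1 = r then v else grid.getD r [] := by
      intro v
      rw [List.getD_eq_getElem _ _ (by simp only [List.length_set]; omega),
        List.getElem_set, List.getD_eq_getElem _ _ (by omega : r < grid.length)]
    have hinner : ∀ v : Int,
        ((grid[pvNIdx n p.1]'(by omega)).set (pvNIdx n p.2) v).getD c 0 =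
          if pvNIdx n p.2 = c then v else (grid[pvNIdx n p.1]'(by omega)).getD c 0 := by
      intro v
      rw [List.getD_eq_getElem _ _ (by simp only [List.length_set]; omega),
        List.getElem_set, List.getD_eq_getElem _ _ (by omega : c < (grid[pvNIdx n p.1]'(by omega)).length)]
    simp only [pvStepA, if_neg h1, pvCell]
    rw [pySetD_in grid n hlen p.1 _ ha hb, hrow,
        pySetD_in _ n hrl p.2 _ hc2 hd, pyGetD_in _ n hrl p.2 _ hc2 hd]
    rw [houter]
    by_cases hxr : pvNIdx n p.1 = r
    · subst hxr
      rw [if_pos rfl, hinner]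
      by_cases hyc : pvNIdx n p.2 = c
      · subst hyc
        rw [if_pos rfl, if_pos ⟨h1, hwrap.mpr ⟨rfl, rfl⟩⟩,
          List.getD_eq_getElem _ _ (by omega : pvNIdx n p.1 < grid.length)]
      · rw [if_neg hyc, if_neg (by rintro ⟨-, hw⟩; exact hyc (hwrap.mp hw).2),
          List.getD_eq_getElem _ _ (by omega : pvNIdx n p.1 < grid.length)]
        ring
    · rw [if_neg hxr, if_neg (by rintro ⟨-, hw⟩; exact hxr (hwrap.mp hw).1)]
      ring

theorem cell_foldA (n : Nat) (L : List (Int × Int)) :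
    ∀ (grid : List (List Int)), grid.length = n → (∀ row ∈ grid, row.length = n) →
    (∀ p ∈ L, pvOK n p) →
    (L.foldl pvStepA grid).length = n ∧ (∀ row ∈ L.foldl pvStepA grid, row.length = n) ∧
    ∀ r c : Nat, r < n → c < n →
      pvCell (L.foldl pvStepA grid) r c =
        pvCell grid r c +
          (L.countP (fun p => decide (p.1 ≠ -1) && decide (pvWrap n p = ((r:Int),(c:Int)))) : Int) := by
  induction L with
  | nil => intro grid h1 h2 _; exact ⟨h1, h2, fun r c _ _ => by simp⟩
  | cons p L ih =>
    intro grid h1 h2 hOK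
    have hp := hOK p List.mem_cons_self
    obtain ⟨s1, s2⟩ := shape_stepA n grid h1 h2 p hp
    obtain ⟨g1, g2, g3⟩ := ih (pvStepA grid p) s1 s2 (fun q hq => hOK q (List.mem_cons_of_mem _ hq))
    refine ⟨by simpa using g1, by simpa using g2, ?_⟩
    intro r c hr hc
    have hg := g3 r c hr hc
    simp only [List.foldl_cons] at *
    rw [hg, cell_stepA n grid h1 h2 p hp r c hr hc, List.countP_cons]
    by_cases hcond : p.1 ≠ -1 ∧ pvWrap n p = ((r:Int),(c:Int))
    · have hbt : (decide (p.1 ≠ -1) && decide (pvWrap n p = ((r:Int),(c:Int)))) = true := by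
        simp [hcond.1, hcond.2]
      rw [if_pos hcond, hbt, if_pos (by trivial)]
      push_cast
      ring
    · have hbf : (decide (p.1 ≠ -1) && decide (pvWrap n p = ((r:Int),(c:Int)))) = false := by
        by_contra hne
        simp only [Bool.not_eq_false, Bool.and_eq_true, decide_eq_true_eq] at hne
        exact hcond hne
      rw [if_neg hcond, hbf]
      push_cast
      ring

-- fold over range(m) reading wp[i] = fold over the first m elements
theorem foldl_range_take {β : Type} (wp : List (Int × Int)) (m : Nat) (hm : m ≤ wp.length)
    (f : β → (Int × Int) → β) (init : β) :
    (PySem.List.pyRange 0 (m:Int) 1).foldl (fun acc i =>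
      match PySem.List.pyGet? wp i with
      | none => acc
      | some p => f acc p) init
    = (wp.take m).foldl f init := by
  induction m with
  | zero => simp [PySem.List.pyRange_one_eq_nil (by omega : (0:Int) ≤ 0)]
  | succ m ih =>
    have hcast : ((m+1 : Nat) : Int) = (m : Int) + 1 := by push_cast; ring
    rw [hcast, PySem.List.pyRange_one_succ_right (Int.natCast_nonneg m), List.foldl_append]
    rw [ih (by omega)]
    have hget : PySem.List.pyGet? wp ((m:Nat):Int) = some (wp[m]'(by omega)) := by
      rw [PySem.List.pyGet?_natCast, List.getElem?_eq_getElem (by omega)]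
    simp only [List.foldl_cons, List.foldl_nil, hget]
    have htake : wp.take (m+1) = wp.take m ++ [wp[m]'(by omega)] := by
      rw [List.take_add_one, List.getElem?_eq_getElem (by omega : m < wp.length)]
      rfl
    rw [htake, List.foldl_append, List.foldl_cons, List.foldl_nil]

theorem pyRange_toNat (M : Int) : PySem.List.pyRange 0 M 1 = PySem.List.pyRange 0 (M.toNat : Int) 1 := by
  by_cases h : M ≤ 0
  · rw [PySem.List.pyRange_one_eq_nil h, PySem.List.pyRange_one_eq_nil (by omega)]
  · rw [Int.toNat_of_nonneg (by omega)]

-- B's append-gather loop builds exactly the filter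
theorem gather_eq_filter (l : List (Int × Int)) :
    ∀ acc : List (Int × Int),
      l.foldl (fun acc p => if p.1 ≠ -1 then acc ++ [p] else acc) acc
        = acc ++ l.filter (fun p => !(p.1 == -1)) := by
  induction l with
  | nil => intro acc; simp
  | cons p t ih =>
    intro acc
    rw [List.foldl_cons]
    by_cases h : p.1 = -1
    · rw [if_neg (by simp [h]), ih, List.filter_cons, if_neg (by simp [h])]
    · rw [if_pos h, ih, List.filter_cons, if_pos (by simp [h])]
      simp

-- B's port characterized: a grid of plain occurrence counts over the first M entries
theorem gridB_char (N M : Int) (wp : List (Int × Int)) (hM : M ≤ (wp.length : Int)) :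
    update_warrior_count_grid_alt N M wp =
      (PySem.List.pyRange 0 N 1).map (fun r => (PySem.List.pyRange 0 N 1).map (fun c =>
        ((wp.take M.toNat).countP (fun p => (p == (r, c)) && !(p.1 == -1)) : Int))) := by
  unfold update_warrior_count_grid_alt
  simp only []
  rw [pyRange_toNat M, foldl_range_take wp M.toNat (by omega)
    (fun acc p => if p.1 ≠ -1 then acc ++ [p] else acc) [], gather_eq_filter, List.nil_append]
  apply List.map_congr_left
  intro r _
  apply List.map_congr_left
  intro c _
  congr 1
  rw [PySem.List.count_eq, List.count, List.countP_filter]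

theorem cell_grid0 (N : Int) (r c : Nat) :
    pvCell ((PySem.List.pyRange 0 N 1).map (fun _ => (PySem.List.pyRange 0 N 1).map (fun _ => (0:Int)))) r c = 0 := by
  unfold pvCell
  rcases h : ((PySem.List.pyRange 0 N 1).map (fun _ => (PySem.List.pyRange 0 N 1).map (fun _ => (0:Int))))[r]? with - | row
  · have hgr : ((PySem.List.pyRange 0 N 1).map (fun _ => (PySem.List.pyRange 0 N 1).map (fun _ => (0:Int)))).getD r [] = [] := by
      rw [List.getD_eq_getElem?_getD, h]
      rfl
    rw [hgr]
    simp
  · have hmem := List.mem_of_getElem? h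
    obtain ⟨y, -, hy⟩ := List.mem_map.mp hmem
    have hgr : ((PySem.List.pyRange 0 N 1).map (fun _ => (PySem.List.pyRange 0 N 1).map (fun _ => (0:Int)))).getD r [] = row := by
      rw [List.getD_eq_getElem?_getD, h]
      rfl
    rw [hgr, ← hy, List.getD_eq_getElem?_getD, List.getElem?_map]
    cases (PySem.List.pyRange 0 N 1)[c]? <;> simp

theorem cell_map (N : Int) (F : Int → Int → Int) (r c : Nat) (hr : r < N.toNat) (hc : c < N.toNat) :
    pvCell ((PySem.List.pyRange 0 N 1).map (fun x => (PySem.List.pyRange 0 N 1).map (fun y => F x y))) r c = F ↑r ↑c := by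
  have hlen : (PySem.List.pyRange 0 N 1).length = N.toNat := by
    rw [PySem.List.length_pyRange_one]; norm_num
  have h1 : ((PySem.List.pyRange 0 N 1).map (fun x => (PySem.List.pyRange 0 N 1).map (fun y => F x y))).getD r []
      = (PySem.List.pyRange 0 N 1).map (fun y => F ((0:Int) + (r:Int)) y) := by
    rw [List.getD_eq_getElem _ _ (by rw [List.length_map, hlen]; exact hr), List.getElem_map,
      PySem.List.getElem_pyRange_one]
  unfold pvCell
  rw [h1, List.getD_eq_getElem _ _ (by rw [List.length_map, hlen]; exact hc), List.getElem_map,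
    PySem.List.getElem_pyRange_one]
  norm_num

theorem getElem_eq_pvCell (G : List (List Int)) (r c : Nat) (hr : r < G.length)
    (hc : c < (G[r]).length) : G[r][c] = pvCell G r c := by
  unfold pvCell
  rw [List.getD_eq_getElem _ _ hr, List.getD_eq_getElem]

-- A's port characterized cell-wise (wrapped counting)
theorem gridA_char (N M : Int) (wp : List (Int × Int)) (hM : M ≤ (wp.length : Int))
    (hOKN : ∀ p ∈ wp.take M.toNat, pvOK N.toNat p) :
    (update_warrior_count_grid N M wp).length = N.toNat ∧
    (∀ row ∈ update_warrior_count_grid N M wp, row.length = N.toNat) ∧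
    ∀ r c : Nat, r < N.toNat → c < N.toNat →
      pvCell (update_warrior_count_grid N M wp) r c =
        ((wp.take M.toNat).countP
          (fun p => decide (p.1 ≠ -1) && decide (pvWrap N.toNat p = ((r:Int),(c:Int)))) : Int) := by
  unfold update_warrior_count_grid
  simp only []
  rw [pyRange_toNat M, foldl_range_take wp M.toNat (by omega) pvStepA]
  have hg0len : ((PySem.List.pyRange 0 N 1).map
      (fun _ => (PySem.List.pyRange 0 N 1).map (fun _ => (0:Int)))).length = N.toNat := by
    rw [List.length_map, PySem.List.length_pyRange_one]; norm_num
  have hg0rows : ∀ row ∈ (PySem.List.pyRange 0 N 1).map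
      (fun _ => (PySem.List.pyRange 0 N 1).map (fun _ => (0:Int))), row.length = N.toNat := by
    intro row hrow
    obtain ⟨x, -, rfl⟩ := List.mem_map.mp hrow
    rw [List.length_map, PySem.List.length_pyRange_one]; norm_num
  obtain ⟨A1, A2, A3⟩ := cell_foldA N.toNat (wp.take M.toNat) _ hg0len hg0rows hOKN
  exact ⟨A1, A2, fun r c hr hc => by rw [A3 r c hr hc, cell_grid0, zero_add]⟩

-- ===== VERDICT (by name: the statement is the Claim_ definition above) =====
theorem update_warrior_count_grid_spec : Claim_equal_update_warrior_count_grid := by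
  intro N M wp _ hPre
  obtain ⟨hM, hbound⟩ := hPre
  show update_warrior_count_grid N M wp = update_warrior_count_grid_alt N M wp
  have hOKN : ∀ p ∈ wp.take M.toNat, pvOK N.toNat p := by
    intro p hp
    rcases hbound p hp with h | h
    · exact Or.inl h
    · right
      have he : ((N.toNat : Nat) : Int) = N := Int.toNat_of_nonneg (by omega)
      rw [he]
      omega
  obtain ⟨A1, A2, A3⟩ := gridA_char N M wp hM hOKN
  rw [gridB_char N M wp hM]
  apply List.ext_getElem
  · rw [A1, List.length_map, PySem.List.length_pyRange_one]; norm_num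
  intro r h1 h2
  apply List.ext_getElem
  · rw [A2 _ (List.getElem_mem _), List.getElem_map, List.length_map,
      PySem.List.length_pyRange_one]; norm_num
  intro c h3 h4
  have hr : r < N.toNat := by rwa [A1] at h1
  have hc : c < N.toNat := by rw [A2 _ (List.getElem_mem _)] at h3; exact h3
  rw [getElem_eq_pvCell _ _ _ h1 h3, getElem_eq_pvCell _ _ _ h2 h4, A3 r c hr hc,
    cell_map N (fun x y => ((wp.take M.toNat).countP (fun p => (p == (x, y)) && !(p.1 == -1)) : Int)) r c hr hc]
  apply congrArg
  apply List.countP_congr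
  intro p hp
  by_cases hp1 : p.1 = -1
  · simp [hp1]
  · have hnn : 0 ≤ p.1 ∧ 0 ≤ p.2 := by
      rcases hbound p hp with h | h
      · exact absurd h hp1
      · exact ⟨h.1, h.2.2.1⟩
    have hw : pvWrap N.toNat p = p := by
      simp only [pvWrap]
      rw [if_neg (by omega), if_neg (by omega)]
    have hw2 : pvWrap N.toNat ((r:Int), (c:Int)) = ((r:Int), (c:Int)) := by
      simp only [pvWrap]
      rw [if_neg (by omega), if_neg (by omega)]
    by_cases hpv : p = ((r:Int), (c:Int)) <;> simp [hp1, hw, hpv, hw2]
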